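-- pv_equiv track=rewrite | github.com/Hydr10n/only_smart_people_can_read_this | only_smart_people_can_read_this.py | start_and_end_of_first_word
-- ===== SOURCE A (Python) =====
-- def start_and_end_of_first_word(text: str) -> tuple:
--     found_word = False
--     start = -1
--     end = 0
--     text_len = len(text)
--     for i in range(text_len):
--         if text[i].isalpha():
--             if start == -1:
--                 start = i
--             end = i
--             if i == text_len - 1:
--                 found_word = True
--         elif start != -1:
--             found_word = True
--         if found_word:
--             return (start, end)
--     return (-1, -1)
-- ===== SOURCE B (Python) =====
-- def start_and_end_of_first_word(text: str) -> tuple: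
--     # Phase 1: locate the first alphabetic character.
--     start = next((i for i, c in enumerate(text) if c.isalpha()), -1)
--     if start == -1:
--         return (-1, -1)
--     # Phase 2: extend the end of the word while characters stay alphabetic.
--     end = start
--     while end + 1 < len(text) and text[end + 1].isalpha():
--         end += 1
--     return (start, end)
-- ===== Notes on version B (the rewrite author's own statement) =====
-- stated objective: simpler
-- what changed: Replaces A's single stateful loop with found_word/start/end flags by a two-phase locate-then-extend scan: find the first alphabetic index, then extend the end while characters stay alphabetic.
import Mathlib
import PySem

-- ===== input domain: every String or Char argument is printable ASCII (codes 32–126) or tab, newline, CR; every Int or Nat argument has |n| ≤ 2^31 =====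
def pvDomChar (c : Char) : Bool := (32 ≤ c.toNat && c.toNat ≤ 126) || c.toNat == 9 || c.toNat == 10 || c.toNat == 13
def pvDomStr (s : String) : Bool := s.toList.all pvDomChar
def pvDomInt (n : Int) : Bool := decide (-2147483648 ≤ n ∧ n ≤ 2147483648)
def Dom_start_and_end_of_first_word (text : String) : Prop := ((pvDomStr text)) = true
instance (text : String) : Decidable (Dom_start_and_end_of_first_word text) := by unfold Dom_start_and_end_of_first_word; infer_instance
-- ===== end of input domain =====

-- B replaces A's single stateful loop (found_word/start/end flags) by a two-phase
-- locate-then-extend scan; objective: simpler.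

-- ===== PORT A =====
-- A's `for i in range(text_len)` loop; `found_word = True` is always followed by the
-- immediate `return (start, end)` within the same iteration, so each case that sets it
-- returns directly here.
def pvALoop (rest : List Char) (total i : Nat) (start e : Int) : Int × Int :=
  match rest with
  | [] => (-1, -1)
  | c :: rs =>
    if PySem.Chars.isalpha c then
      let start' := if start = -1 then (i : Int) else start
      let e' := (i : Int)
      if i = total - 1 then (start', e')          -- found_word := True; return
      else pvALoop rs total (i + 1) start' e'
    else if start ≠ -1 then (start, e)            -- found_word := True; return
    else pvALoop rs total (i + 1) start e

def start_and_end_of_first_word (text : String) : Int × Int :=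
  pvALoop text.toList text.toList.length 0 (-1) 0

-- ===== PORT B =====
-- Phase 1: first index whose character is alphabetic (the enumerate generator).
def pvBFind (rest : List Char) (i : Nat) : Option Nat :=
  match rest with
  | [] => none
  | c :: rs => if PySem.Chars.isalpha c then some i else pvBFind rs (i + 1)

-- Phase 2: the while loop extending `end`.
def pvBExtend (cs : List Char) (e : Nat) : Nat :=
  if h : e + 1 < cs.length then
    if PySem.Chars.isalpha cs[e + 1] then pvBExtend cs (e + 1) else e
  else e
termination_by cs.length - e

def start_and_end_of_first_word_alt (text : String) : Int × Int :=
  match pvBFind text.toList 0 with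
  | none => (-1, -1)
  | some s => ((s : Int), (pvBExtend text.toList s : Int))

-- ===== PRECONDITION & SPEC =====
def Spec_start_and_end_of_first_word (text : String) (out : Int × Int) : Prop := out = start_and_end_of_first_word_alt text
instance (text : String) (out : Int × Int) : Decidable (Spec_start_and_end_of_first_word text out) := by unfold Spec_start_and_end_of_first_word; infer_instance

-- ===== CLAIM (what is proved, stated in full; the proofs are below) =====
def Claim_equal_start_and_end_of_first_word : Prop := ∀ (text : String), Dom_start_and_end_of_first_word text → Spec_start_and_end_of_first_word text (start_and_end_of_first_word text)

-- ===== LEMMAS AND PROOFS =====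

-- A's loop after the word has started (start ≠ -1, e = i - 1): it returns
-- (start, i - 1 + length of the alphabetic run beginning at i).
theorem pvALoop_word (rest : List Char) (total : Nat) :
    ∀ i start, rest ≠ [] → i + rest.length = total → start ≠ (-1 : Int) →
      pvALoop rest total i start ((i : Int) - 1)
        = (start, (i : Int) - 1 + (rest.takeWhile PySem.Chars.isalpha).length) := by
  induction rest with
  | nil => intro i start h; exact absurd rfl h
  | cons c rs ih =>
    intro i start _ hlen hstart
    by_cases hc : PySem.Chars.isalpha c
    · by_cases hend : i = total - 1
      · have hrs : rs = [] := by
          cases rs with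
          | nil => rfl
          | cons d ds => simp [List.length] at hlen; omega
        subst hrs
        simp [pvALoop, hc, hend, hstart, List.takeWhile]
      · have hrs : rs ≠ [] := by
          intro h; subst h; simp [List.length] at hlen; omega
        have := ih (i + 1) start hrs (by simp at hlen ⊢; omega) hstart
        simp [pvALoop, hc, hend, hstart] at this ⊢
        exact this
    · simp [pvALoop, hc, hstart, List.takeWhile]

-- pvBFind returns an index ≥ its start argument
theorem pvBFind_ge (rest : List Char) : ∀ i s, pvBFind rest i = some s → i ≤ s := by
  induction rest with
  | nil => intro i s h; simp [pvBFind] at h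
  | cons c rs ih =>
    intro i s h
    by_cases hc : PySem.Chars.isalpha c
    · simp [pvBFind, hc] at h; omega
    · have := ih (i + 1) s (by simpa [pvBFind, hc] using h)
      omega

-- A's loop in the search phase (start = -1): (-1,-1) if no alphabetic char remains,
-- else the word starting at the first alphabetic index.
theorem pvALoop_search (rest : List Char) (total : Nat) :
    ∀ i e, i + rest.length = total →
      pvALoop rest total i (-1) e
        = (match pvBFind rest i with
           | none => ((-1 : Int), (-1 : Int))
           | some s => ((s : Int),
               (s : Int) + ((rest.drop ((s - i) + 1)).takeWhile PySem.Chars.isalpha).length)) := by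
  induction rest with
  | nil => intro i e _; simp [pvALoop, pvBFind]
  | cons c rs ih =>
    intro i e hlen
    by_cases hc : PySem.Chars.isalpha c
    · by_cases hend : i = total - 1
      · have hrs : rs = [] := by
          cases rs with
          | nil => rfl
          | cons d ds => simp [List.length] at hlen; omega
        subst hrs
        simp [pvALoop, pvBFind, hc, hend, List.drop]
      · have hrs : rs ≠ [] := by
          intro h; subst h; simp [List.length] at hlen; omega
        have hw := pvALoop_word rs total (i + 1) (i : Int) hrs
          (by simp at hlen ⊢; omega) (by omega)
        push_cast at hw
        rw [show ((i : Int) + 1 - 1) = (i : Int) by ring] at hw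
        simp [pvALoop, pvBFind, hc, hend, hw]
    · have := ih (i + 1) e (by simp at hlen ⊢; omega)
      simp [pvALoop, pvBFind, hc, this]
      cases hfind : pvBFind rs (i + 1) with
      | none => simp
      | some s =>
        have hs : i + 1 ≤ s := pvBFind_ge rs (i + 1) s hfind
        simp
        have : s - i = (s - (i + 1)) + 1 := by omega
        rw [this]

-- B's while loop computes s + length of the alphabetic run starting at s+1
theorem pvBExtend_eq (cs : List Char) : ∀ e,
    pvBExtend cs e = e + ((cs.drop (e + 1)).takeWhile PySem.Chars.isalpha).length := by
  intro e
  fun_induction pvBExtend cs e with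
  | case1 e h hc ih =>
    have hdrop : cs.drop (e + 1) = cs[e + 1] :: cs.drop (e + 2) := by
      rw [List.drop_eq_getElem_cons h]
    rw [ih, hdrop, List.takeWhile_cons, if_pos hc]
    rw [show e + 1 + 1 = e + 2 from rfl]
    simp; omega
  | case2 e h hc =>
    have hdrop : cs.drop (e + 1) = cs[e + 1] :: cs.drop (e + 2) := by
      rw [List.drop_eq_getElem_cons h]
    rw [hdrop, List.takeWhile_cons, if_neg hc]
    simp
  | case3 e h =>
    have : cs.drop (e + 1) = [] := List.drop_eq_nil_of_le (by omega)
    simp [this]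

-- ===== VERDICT (by name: the statement is the Claim_ definition above) =====
theorem start_and_end_of_first_word_spec : Claim_equal_start_and_end_of_first_word := by
  intro text _
  unfold Spec_start_and_end_of_first_word start_and_end_of_first_word start_and_end_of_first_word_alt
  rw [pvALoop_search text.toList text.toList.length 0 0 (by simp)]
  cases hfind : pvBFind text.toList 0 with
  | none => simp
  | some s =>
    simp [pvBExtend_eq]
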